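-- pv_equiv track=rewrite | github.com/sywoolab/sy-workspace | workout/scripts/workout_analysis.py | estimate_vdot
-- ===== SOURCE A (Python) =====
-- VDOT_TABLE = [
--     # (vdot, 10k_sec_per_km, easy_low, easy_high, tempo, interval)
--     (30, 414, 448, 496, 396, 362),  # 6:54, E 7:28-8:16, T 6:36, I 6:02
--     (31, 403, 436, 483, 385, 352),
--     (32, 393, 425, 471, 375, 342),
--     (33, 383, 414, 459, 365, 333),
--     (34, 374, 404, 448, 356, 324),
--     (35, 365, 394, 437, 347, 316),  # 6:05, E 6:34-7:17, T 5:47, I 5:16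
--     (36, 356, 385, 427, 339, 308),  # 5:56, E 6:25-7:07, T 5:39, I 5:08
--     (37, 348, 376, 417, 331, 300),  # 5:48, E 6:16-6:57, T 5:31, I 5:00
--     (38, 340, 367, 407, 323, 293),  # 5:40, E 6:07-6:47, T 5:23, I 4:53
--     (39, 333, 359, 398, 316, 286),
--     (40, 326, 351, 389, 309, 280),  # 5:26, E 5:51-6:29, T 5:09, I 4:40
--     (41, 319, 344, 381, 302, 274),
--     (42, 312, 337, 373, 296, 268),
--     (43, 306, 330, 365, 290, 262),
--     (44, 300, 323, 358, 284, 257),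
--     (45, 294, 317, 351, 278, 252),  # 4:54, E 5:17-5:51, T 4:38, I 4:12
-- ]
--
-- def estimate_vdot(pace_sec_per_km, distance_km):
--     """러닝 페이스와 거리로 VDOT 추정 (보수적)"""
--     # VDOT는 올아웃 레이스 기준. 훈련 페이스는 과대평가 → 보수적 보정
--     # 짧은 거리일수록 보정 크게
--     if distance_km < 5:
--         pace_sec_per_km += 20
--     elif distance_km < 8:
--         pace_sec_per_km += 12
--     elif distance_km < 10:
--         pace_sec_per_km += 7
--     # 10km+ = 보정 없음 (레이스에 가까운 거리)
--
--     # 복귀 초기 (데이터 부족)는 추가 보수적 보정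
--     # → update_vdot에서 가중평균으로 처리
--
--     best_vdot = 30
--     for vdot, race_pace, *_ in VDOT_TABLE:
--         if pace_sec_per_km <= race_pace:
--             best_vdot = vdot
--     return best_vdot
-- ===== SOURCE B (Python) =====
-- PACES = [414, 403, 393, 383, 374, 365, 356, 348, 340, 333,
--          326, 319, 312, 306, 300, 294]  # 10k race pace column, descending; row i <-> vdot 30+i
--
--
-- def estimate_vdot(pace_sec_per_km, distance_km):
--     if distance_km < 5:
--         pace_sec_per_km += 20
--     elif distance_km < 8:
--         pace_sec_per_km += 12
--     elif distance_km < 10: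
--         pace_sec_per_km += 7
--     # binary search: lo ends as the number of rows with pace <= race_pace
--     # (the matching rows form a prefix since PACES is descending)
--     lo, hi = 0, len(PACES)
--     while lo < hi:
--         mid = (lo + hi) // 2
--         if pace_sec_per_km <= PACES[mid]:
--             lo = mid + 1
--         else:
--             hi = mid
--     return 30 if lo == 0 else 29 + lo
-- ===== Notes on version B (the rewrite author's own statement) =====
-- stated objective: alternative
-- what changed: Replaces the linear scan that remembers the last matching row with a binary search over the descending race-pace column, mapping the prefix length of matching rows back to a VDOT arithmetically.
import Mathlib
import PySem

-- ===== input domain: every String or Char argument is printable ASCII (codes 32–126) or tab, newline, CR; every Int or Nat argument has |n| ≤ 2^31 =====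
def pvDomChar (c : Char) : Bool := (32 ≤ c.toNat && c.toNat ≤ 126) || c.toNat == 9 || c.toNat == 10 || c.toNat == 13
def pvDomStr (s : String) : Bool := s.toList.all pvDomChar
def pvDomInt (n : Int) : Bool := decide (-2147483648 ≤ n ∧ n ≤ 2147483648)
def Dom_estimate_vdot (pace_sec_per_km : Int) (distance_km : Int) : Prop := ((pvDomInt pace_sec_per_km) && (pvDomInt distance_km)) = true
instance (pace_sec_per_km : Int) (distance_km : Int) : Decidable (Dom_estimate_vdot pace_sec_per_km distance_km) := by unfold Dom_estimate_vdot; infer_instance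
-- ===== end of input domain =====

-- B replaces A's linear last-match scan of the table with a binary search over the
-- descending race-pace column (alternative decomposition; the 16-row table makes speed moot).

-- ===== PORT A =====
-- module constant VDOT_TABLE: (vdot, 10k_sec_per_km, easy_low, easy_high, tempo, interval)
def VDOT_TABLE : List (Int × Int × Int × Int × Int × Int) :=
  [(30, 414, 448, 496, 396, 362),
   (31, 403, 436, 483, 385, 352),
   (32, 393, 425, 471, 375, 342),
   (33, 383, 414, 459, 365, 333),
   (34, 374, 404, 448, 356, 324),
   (35, 365, 394, 437, 347, 316),
   (36, 356, 385, 427, 339, 308),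
   (37, 348, 376, 417, 331, 300),
   (38, 340, 367, 407, 323, 293),
   (39, 333, 359, 398, 316, 286),
   (40, 326, 351, 389, 309, 280),
   (41, 319, 344, 381, 302, 274),
   (42, 312, 337, 373, 296, 268),
   (43, 306, 330, 365, 290, 262),
   (44, 300, 323, 358, 284, 257),
   (45, 294, 317, 351, 278, 252)]

def estimate_vdot (pace_sec_per_km : Int) (distance_km : Int) : Int :=
  let pace :=
    if distance_km < 5 then pace_sec_per_km + 20
    else if distance_km < 8 then pace_sec_per_km + 12
    else if distance_km < 10 then pace_sec_per_km + 7
    else pace_sec_per_km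
  VDOT_TABLE.foldl (fun best_vdot row => if pace ≤ row.2.1 then row.1 else best_vdot) 30

-- ===== PORT B =====
-- module constant PACES: the 10k race-pace column, descending; row i corresponds to vdot 30+i
def PACES : List Int :=
  [414, 403, 393, 383, 374, 365, 356, 348, 340, 333, 326, 319, 312, 306, 300, 294]

-- the while loop of Source B; fuel ≥ hi - lo, only a totality guard (never reached while lo < hi)
def bsLoop : Nat → Int → Nat → Nat → Nat
  | 0, _, lo, _ => lo
  | fuel + 1, pace, lo, hi =>
    if lo < hi then
      let mid := (lo + hi) / 2
      -- in-range literal index, so List.getD is Python's PACES[mid]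
      if pace ≤ PACES.getD mid 0 then bsLoop fuel pace (mid + 1) hi
      else bsLoop fuel pace lo mid
    else lo

def estimate_vdot_alt (pace_sec_per_km : Int) (distance_km : Int) : Int :=
  let pace :=
    if distance_km < 5 then pace_sec_per_km + 20
    else if distance_km < 8 then pace_sec_per_km + 12
    else if distance_km < 10 then pace_sec_per_km + 7
    else pace_sec_per_km
  let lo := bsLoop 16 pace 0 16
  if lo = 0 then 30 else 29 + (lo : Int)

-- ===== PRECONDITION & SPEC =====
def Spec_estimate_vdot (pace_sec_per_km : Int) (distance_km : Int) (out : Int) : Prop := out = estimate_vdot_alt pace_sec_per_km distance_km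
instance (pace_sec_per_km : Int) (distance_km : Int) (out : Int) : Decidable (Spec_estimate_vdot pace_sec_per_km distance_km out) := by unfold Spec_estimate_vdot; infer_instance

-- ===== CLAIM (what is proved, stated in full; the proofs are below) =====
def Claim_equal_estimate_vdot : Prop := ∀ (pace_sec_per_km : Int) (distance_km : Int), Dom_estimate_vdot pace_sec_per_km distance_km → Spec_estimate_vdot pace_sec_per_km distance_km (estimate_vdot pace_sec_per_km distance_km)

-- ===== LEMMAS AND PROOFS =====
-- core: for any adjusted pace, the linear last-match scan and the binary search agree
theorem core_eq (p : Int) :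
    (VDOT_TABLE.foldl (fun best_vdot row => if p ≤ row.2.1 then row.1 else best_vdot) 30)
      = (let lo := bsLoop 16 p 0 16; if lo = 0 then 30 else 29 + (lo : Int)) := by
  by_cases h294 : p ≤ 294
  · simp [VDOT_TABLE, List.foldl, bsLoop, PACES, eq_true (show p ≤ 414 by omega), eq_true (show p ≤ 403 by omega), eq_true (show p ≤ 393 by omega), eq_true (show p ≤ 383 by omega), eq_true (show p ≤ 374 by omega), eq_true (show p ≤ 365 by omega), eq_true (show p ≤ 356 by omega), eq_true (show p ≤ 348 by omega), eq_true (show p ≤ 340 by omega), eq_true (show p ≤ 333 by omega), eq_true (show p ≤ 326 by omega), eq_true (show p ≤ 319 by omega), eq_true (show p ≤ 312 by omega), eq_true (show p ≤ 306 by omega), eq_true (show p ≤ 300 by omega), eq_true (show p ≤ 294 by omega)]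
  by_cases h300 : p ≤ 300
  · simp [VDOT_TABLE, List.foldl, bsLoop, PACES, eq_true (show p ≤ 414 by omega), eq_true (show p ≤ 403 by omega), eq_true (show p ≤ 393 by omega), eq_true (show p ≤ 383 by omega), eq_true (show p ≤ 374 by omega), eq_true (show p ≤ 365 by omega), eq_true (show p ≤ 356 by omega), eq_true (show p ≤ 348 by omega), eq_true (show p ≤ 340 by omega), eq_true (show p ≤ 333 by omega), eq_true (show p ≤ 326 by omega), eq_true (show p ≤ 319 by omega), eq_true (show p ≤ 312 by omega), eq_true (show p ≤ 306 by omega), eq_true (show p ≤ 300 by omega), eq_false (show ¬ p ≤ 294 by omega)]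
  by_cases h306 : p ≤ 306
  · simp [VDOT_TABLE, List.foldl, bsLoop, PACES, eq_true (show p ≤ 414 by omega), eq_true (show p ≤ 403 by omega), eq_true (show p ≤ 393 by omega), eq_true (show p ≤ 383 by omega), eq_true (show p ≤ 374 by omega), eq_true (show p ≤ 365 by omega), eq_true (show p ≤ 356 by omega), eq_true (show p ≤ 348 by omega), eq_true (show p ≤ 340 by omega), eq_true (show p ≤ 333 by omega), eq_true (show p ≤ 326 by omega), eq_true (show p ≤ 319 by omega), eq_true (show p ≤ 312 by omega), eq_true (show p ≤ 306 by omega), eq_false (show ¬ p ≤ 300 by omega), eq_false (show ¬ p ≤ 294 by omega)]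
  by_cases h312 : p ≤ 312
  · simp [VDOT_TABLE, List.foldl, bsLoop, PACES, eq_true (show p ≤ 414 by omega), eq_true (show p ≤ 403 by omega), eq_true (show p ≤ 393 by omega), eq_true (show p ≤ 383 by omega), eq_true (show p ≤ 374 by omega), eq_true (show p ≤ 365 by omega), eq_true (show p ≤ 356 by omega), eq_true (show p ≤ 348 by omega), eq_true (show p ≤ 340 by omega), eq_true (show p ≤ 333 by omega), eq_true (show p ≤ 326 by omega), eq_true (show p ≤ 319 by omega), eq_true (show p ≤ 312 by omega), eq_false (show ¬ p ≤ 306 by omega), eq_false (show ¬ p ≤ 300 by omega), eq_false (show ¬ p ≤ 294 by omega)]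
  by_cases h319 : p ≤ 319
  · simp [VDOT_TABLE, List.foldl, bsLoop, PACES, eq_true (show p ≤ 414 by omega), eq_true (show p ≤ 403 by omega), eq_true (show p ≤ 393 by omega), eq_true (show p ≤ 383 by omega), eq_true (show p ≤ 374 by omega), eq_true (show p ≤ 365 by omega), eq_true (show p ≤ 356 by omega), eq_true (show p ≤ 348 by omega), eq_true (show p ≤ 340 by omega), eq_true (show p ≤ 333 by omega), eq_true (show p ≤ 326 by omega), eq_true (show p ≤ 319 by omega), eq_false (show ¬ p ≤ 312 by omega), eq_false (show ¬ p ≤ 306 by omega), eq_false (show ¬ p ≤ 300 by omega), eq_false (show ¬ p ≤ 294 by omega)]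
  by_cases h326 : p ≤ 326
  · simp [VDOT_TABLE, List.foldl, bsLoop, PACES, eq_true (show p ≤ 414 by omega), eq_true (show p ≤ 403 by omega), eq_true (show p ≤ 393 by omega), eq_true (show p ≤ 383 by omega), eq_true (show p ≤ 374 by omega), eq_true (show p ≤ 365 by omega), eq_true (show p ≤ 356 by omega), eq_true (show p ≤ 348 by omega), eq_true (show p ≤ 340 by omega), eq_true (show p ≤ 333 by omega), eq_true (show p ≤ 326 by omega), eq_false (show ¬ p ≤ 319 by omega), eq_false (show ¬ p ≤ 312 by omega), eq_false (show ¬ p ≤ 306 by omega), eq_false (show ¬ p ≤ 300 by omega), eq_false (show ¬ p ≤ 294 by omega)]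
  by_cases h333 : p ≤ 333
  · simp [VDOT_TABLE, List.foldl, bsLoop, PACES, eq_true (show p ≤ 414 by omega), eq_true (show p ≤ 403 by omega), eq_true (show p ≤ 393 by omega), eq_true (show p ≤ 383 by omega), eq_true (show p ≤ 374 by omega), eq_true (show p ≤ 365 by omega), eq_true (show p ≤ 356 by omega), eq_true (show p ≤ 348 by omega), eq_true (show p ≤ 340 by omega), eq_true (show p ≤ 333 by omega), eq_false (show ¬ p ≤ 326 by omega), eq_false (show ¬ p ≤ 319 by omega), eq_false (show ¬ p ≤ 312 by omega), eq_false (show ¬ p ≤ 306 by omega), eq_false (show ¬ p ≤ 300 by omega), eq_false (show ¬ p ≤ 294 by omega)]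
  by_cases h340 : p ≤ 340
  · simp [VDOT_TABLE, List.foldl, bsLoop, PACES, eq_true (show p ≤ 414 by omega), eq_true (show p ≤ 403 by omega), eq_true (show p ≤ 393 by omega), eq_true (show p ≤ 383 by omega), eq_true (show p ≤ 374 by omega), eq_true (show p ≤ 365 by omega), eq_true (show p ≤ 356 by omega), eq_true (show p ≤ 348 by omega), eq_true (show p ≤ 340 by omega), eq_false (show ¬ p ≤ 333 by omega), eq_false (show ¬ p ≤ 326 by omega), eq_false (show ¬ p ≤ 319 by omega), eq_false (show ¬ p ≤ 312 by omega), eq_false (show ¬ p ≤ 306 by omega), eq_false (show ¬ p ≤ 300 by omega), eq_false (show ¬ p ≤ 294 by omega)]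
  by_cases h348 : p ≤ 348
  · simp [VDOT_TABLE, List.foldl, bsLoop, PACES, eq_true (show p ≤ 414 by omega), eq_true (show p ≤ 403 by omega), eq_true (show p ≤ 393 by omega), eq_true (show p ≤ 383 by omega), eq_true (show p ≤ 374 by omega), eq_true (show p ≤ 365 by omega), eq_true (show p ≤ 356 by omega), eq_true (show p ≤ 348 by omega), eq_false (show ¬ p ≤ 340 by omega), eq_false (show ¬ p ≤ 333 by omega), eq_false (show ¬ p ≤ 326 by omega), eq_false (show ¬ p ≤ 319 by omega), eq_false (show ¬ p ≤ 312 by omega), eq_false (show ¬ p ≤ 306 by omega), eq_false (show ¬ p ≤ 300 by omega), eq_false (show ¬ p ≤ 294 by omega)]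
  by_cases h356 : p ≤ 356
  · simp [VDOT_TABLE, List.foldl, bsLoop, PACES, eq_true (show p ≤ 414 by omega), eq_true (show p ≤ 403 by omega), eq_true (show p ≤ 393 by omega), eq_true (show p ≤ 383 by omega), eq_true (show p ≤ 374 by omega), eq_true (show p ≤ 365 by omega), eq_true (show p ≤ 356 by omega), eq_false (show ¬ p ≤ 348 by omega), eq_false (show ¬ p ≤ 340 by omega), eq_false (show ¬ p ≤ 333 by omega), eq_false (show ¬ p ≤ 326 by omega), eq_false (show ¬ p ≤ 319 by omega), eq_false (show ¬ p ≤ 312 by omega), eq_false (show ¬ p ≤ 306 by omega), eq_false (show ¬ p ≤ 300 by omega), eq_false (show ¬ p ≤ 294 by omega)]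
  by_cases h365 : p ≤ 365
  · simp [VDOT_TABLE, List.foldl, bsLoop, PACES, eq_true (show p ≤ 414 by omega), eq_true (show p ≤ 403 by omega), eq_true (show p ≤ 393 by omega), eq_true (show p ≤ 383 by omega), eq_true (show p ≤ 374 by omega), eq_true (show p ≤ 365 by omega), eq_false (show ¬ p ≤ 356 by omega), eq_false (show ¬ p ≤ 348 by omega), eq_false (show ¬ p ≤ 340 by omega), eq_false (show ¬ p ≤ 333 by omega), eq_false (show ¬ p ≤ 326 by omega), eq_false (show ¬ p ≤ 319 by omega), eq_false (show ¬ p ≤ 312 by omega), eq_false (show ¬ p ≤ 306 by omega), eq_false (show ¬ p ≤ 300 by omega), eq_false (show ¬ p ≤ 294 by omega)]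
  by_cases h374 : p ≤ 374
  · simp [VDOT_TABLE, List.foldl, bsLoop, PACES, eq_true (show p ≤ 414 by omega), eq_true (show p ≤ 403 by omega), eq_true (show p ≤ 393 by omega), eq_true (show p ≤ 383 by omega), eq_true (show p ≤ 374 by omega), eq_false (show ¬ p ≤ 365 by omega), eq_false (show ¬ p ≤ 356 by omega), eq_false (show ¬ p ≤ 348 by omega), eq_false (show ¬ p ≤ 340 by omega), eq_false (show ¬ p ≤ 333 by omega), eq_false (show ¬ p ≤ 326 by omega), eq_false (show ¬ p ≤ 319 by omega), eq_false (show ¬ p ≤ 312 by omega), eq_false (show ¬ p ≤ 306 by omega), eq_false (show ¬ p ≤ 300 by omega), eq_false (show ¬ p ≤ 294 by omega)]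
  by_cases h383 : p ≤ 383
  · simp [VDOT_TABLE, List.foldl, bsLoop, PACES, eq_true (show p ≤ 414 by omega), eq_true (show p ≤ 403 by omega), eq_true (show p ≤ 393 by omega), eq_true (show p ≤ 383 by omega), eq_false (show ¬ p ≤ 374 by omega), eq_false (show ¬ p ≤ 365 by omega), eq_false (show ¬ p ≤ 356 by omega), eq_false (show ¬ p ≤ 348 by omega), eq_false (show ¬ p ≤ 340 by omega), eq_false (show ¬ p ≤ 333 by omega), eq_false (show ¬ p ≤ 326 by omega), eq_false (show ¬ p ≤ 319 by omega), eq_false (show ¬ p ≤ 312 by omega), eq_false (show ¬ p ≤ 306 by omega), eq_false (show ¬ p ≤ 300 by omega), eq_false (show ¬ p ≤ 294 by omega)]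
  by_cases h393 : p ≤ 393
  · simp [VDOT_TABLE, List.foldl, bsLoop, PACES, eq_true (show p ≤ 414 by omega), eq_true (show p ≤ 403 by omega), eq_true (show p ≤ 393 by omega), eq_false (show ¬ p ≤ 383 by omega), eq_false (show ¬ p ≤ 374 by omega), eq_false (show ¬ p ≤ 365 by omega), eq_false (show ¬ p ≤ 356 by omega), eq_false (show ¬ p ≤ 348 by omega), eq_false (show ¬ p ≤ 340 by omega), eq_false (show ¬ p ≤ 333 by omega), eq_false (show ¬ p ≤ 326 by omega), eq_false (show ¬ p ≤ 319 by omega), eq_false (show ¬ p ≤ 312 by omega), eq_false (show ¬ p ≤ 306 by omega), eq_false (show ¬ p ≤ 300 by omega), eq_false (show ¬ p ≤ 294 by omega)]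
  by_cases h403 : p ≤ 403
  · simp [VDOT_TABLE, List.foldl, bsLoop, PACES, eq_true (show p ≤ 414 by omega), eq_true (show p ≤ 403 by omega), eq_false (show ¬ p ≤ 393 by omega), eq_false (show ¬ p ≤ 383 by omega), eq_false (show ¬ p ≤ 374 by omega), eq_false (show ¬ p ≤ 365 by omega), eq_false (show ¬ p ≤ 356 by omega), eq_false (show ¬ p ≤ 348 by omega), eq_false (show ¬ p ≤ 340 by omega), eq_false (show ¬ p ≤ 333 by omega), eq_false (show ¬ p ≤ 326 by omega), eq_false (show ¬ p ≤ 319 by omega), eq_false (show ¬ p ≤ 312 by omega), eq_false (show ¬ p ≤ 306 by omega), eq_false (show ¬ p ≤ 300 by omega), eq_false (show ¬ p ≤ 294 by omega)]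
  by_cases h414 : p ≤ 414
  · simp [VDOT_TABLE, List.foldl, bsLoop, PACES, eq_true (show p ≤ 414 by omega), eq_false (show ¬ p ≤ 403 by omega), eq_false (show ¬ p ≤ 393 by omega), eq_false (show ¬ p ≤ 383 by omega), eq_false (show ¬ p ≤ 374 by omega), eq_false (show ¬ p ≤ 365 by omega), eq_false (show ¬ p ≤ 356 by omega), eq_false (show ¬ p ≤ 348 by omega), eq_false (show ¬ p ≤ 340 by omega), eq_false (show ¬ p ≤ 333 by omega), eq_false (show ¬ p ≤ 326 by omega), eq_false (show ¬ p ≤ 319 by omega), eq_false (show ¬ p ≤ 312 by omega), eq_false (show ¬ p ≤ 306 by omega), eq_false (show ¬ p ≤ 300 by omega), eq_false (show ¬ p ≤ 294 by omega)]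
  simp [VDOT_TABLE, List.foldl, bsLoop, PACES, eq_false (show ¬ p ≤ 414 by omega), eq_false (show ¬ p ≤ 403 by omega), eq_false (show ¬ p ≤ 393 by omega), eq_false (show ¬ p ≤ 383 by omega), eq_false (show ¬ p ≤ 374 by omega), eq_false (show ¬ p ≤ 365 by omega), eq_false (show ¬ p ≤ 356 by omega), eq_false (show ¬ p ≤ 348 by omega), eq_false (show ¬ p ≤ 340 by omega), eq_false (show ¬ p ≤ 333 by omega), eq_false (show ¬ p ≤ 326 by omega), eq_false (show ¬ p ≤ 319 by omega), eq_false (show ¬ p ≤ 312 by omega), eq_false (show ¬ p ≤ 306 by omega), eq_false (show ¬ p ≤ 300 by omega), eq_false (show ¬ p ≤ 294 by omega)]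

-- ===== VERDICT (by name: the statement is the Claim_ definition above) =====
theorem estimate_vdot_spec : Claim_equal_estimate_vdot := by
  intro p d _
  unfold Spec_estimate_vdot estimate_vdot estimate_vdot_alt
  split_ifs <;> exact core_eq _
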